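-- pv_equiv track=rewrite | github.com/grgrego07/mean_reversion | mean_merge.py | _compute_segments
-- ===== SOURCE A (Python) =====
-- def _compute_segments(index, mask_bool):
--     segs = []
--     start = None
--     for i, flag in enumerate(mask_bool):
--         if flag and start is None: start = index[i]
--         if (not flag) and (start is not None):
--             segs.append((start, index[i]))
--             start = None
--     if start is not None: segs.append((start, index[-1]))
--     return segs
-- ===== SOURCE B (Python) =====
-- def _compute_segments(index, mask_bool):
--     segs = []
--     n = len(mask_bool)
--     i = 0
--     while i < n:
--         if not mask_bool[i]:
--             i += 1
--             continue
--         j = i + 1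
--         while j < n and mask_bool[j]:
--             j += 1
--         segs.append((index[i], index[j] if j < n else index[-1]))
--         i = j + 1
--     return segs
-- ===== Notes on version B (the rewrite author's own statement) =====
-- stated objective: alternative
-- what changed: Replaced A's per-element start-sentinel state machine with an explicit run scanner: an outer loop that skips False entries and, at each True, an inner scan that finds the end of the contiguous True run and emits the segment at once.
import Mathlib
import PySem

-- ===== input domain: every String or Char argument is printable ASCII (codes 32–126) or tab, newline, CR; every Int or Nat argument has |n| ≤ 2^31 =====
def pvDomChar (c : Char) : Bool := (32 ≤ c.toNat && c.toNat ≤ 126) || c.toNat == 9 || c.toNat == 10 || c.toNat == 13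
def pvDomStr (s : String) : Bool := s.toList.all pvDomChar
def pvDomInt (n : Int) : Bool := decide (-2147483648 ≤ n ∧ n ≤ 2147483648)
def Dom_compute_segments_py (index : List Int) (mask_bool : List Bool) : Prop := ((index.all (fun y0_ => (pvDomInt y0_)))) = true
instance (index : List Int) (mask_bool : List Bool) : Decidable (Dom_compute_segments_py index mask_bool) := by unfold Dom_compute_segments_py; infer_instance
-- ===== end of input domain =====

-- B replaces A's per-element start-sentinel state machine by an explicit run scanner
-- (outer loop skips False, inner scan finds the run's end); same O(n) cost (objective: alternative).

-- index[i] (both Pythons only evaluate it where Pre_ guarantees it is in range)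
def pvIdx (index : List Int) (i : Int) : Int := (PySem.List.pyGet? index i).getD 0

-- ===== PORT A =====
def compute_segments_py (index : List Int) (mask_bool : List Bool) : List (Int × Int) :=
  let r := (PySem.List.enumerate mask_bool).foldl
    (fun (acc : List (Int × Int) × Option Int) (p : Int × Bool) =>
      let s := if p.2 && acc.2.isNone then some (pvIdx index p.1) else acc.2
      if (!p.2) && s.isSome then (acc.1 ++ [(s.getD 0, pvIdx index p.1)], none)
      else (acc.1, s))
    ([], none)
  match r.2 with
  | some s => r.1 ++ [(s, pvIdx index (-1))]
  | none => r.1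

-- ===== PORT B =====
-- the inner 'while j < n and mask_bool[j]: j += 1' of Source B: number of leading Trues
def pvRun : List Bool → Nat
  | true :: t => 1 + pvRun t
  | _ => 0

-- the outer while-loop of Source B; i is the current absolute position, n = len(mask_bool)
def pvScan (index : List Int) (n : Nat) (i : Nat) : List Bool → List (Int × Int)
  | [] => []
  | false :: t => pvScan index n (i + 1) t
  | true :: t =>
      let j := i + 1 + pvRun t
      (pvIdx index i, if j < n then pvIdx index j else pvIdx index (-1)) ::
        pvScan index n (j + 1) (t.drop (pvRun t + 1))
  termination_by m => m.length
  decreasing_by all_goals simp [List.length_drop] <;> omega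

def compute_segments_py_alt (index : List Int) (mask_bool : List Bool) : List (Int × Int) :=
  pvScan index mask_bool.length 0 mask_bool

-- ===== PRECONDITION & SPEC =====
-- Exactly the inputs on which Python A returns (no IndexError): index[i] is only read at the
-- positions i where the flag differs from its predecessor (a run boundary), plus index[-1]
-- which such a boundary already forces to exist.
def Pre_compute_segments_py (index : List Int) (mask_bool : List Bool) : Prop :=
  ∀ i : Nat, i < mask_bool.length →
    mask_bool.getD i false ≠ (decide (0 < i) && mask_bool.getD (i - 1) false) →
    i < index.length
instance (index : List Int) (mask_bool : List Bool) : Decidable (Pre_compute_segments_py index mask_bool) := by unfold Pre_compute_segments_py; infer_instance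

def pvWitness_compute_segments_py : List Int × List Bool := ([1, 2, 3], [true, false, true])

def Spec_compute_segments_py (index : List Int) (mask_bool : List Bool) (out : List (Int × Int)) : Prop := out = compute_segments_py_alt index mask_bool
instance (index : List Int) (mask_bool : List Bool) (out : List (Int × Int)) : Decidable (Spec_compute_segments_py index mask_bool out) := by unfold Spec_compute_segments_py; infer_instance

-- ===== CLAIM (what is proved, stated in full; the proofs are below) =====
def Claim_equal_compute_segments_py : Prop := ∀ (index : List Int) (mask_bool : List Bool), Dom_compute_segments_py index mask_bool → Pre_compute_segments_py index mask_bool → Spec_compute_segments_py index mask_bool (compute_segments_py index mask_bool)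

-- ===== LEMMAS AND PROOFS =====

-- A's state machine written as structural recursion (i: current absolute position, start: pending start)
def pvSA (index : List Int) (i : Int) (start : Option Int) : List Bool → List (Int × Int)
  | [] =>
      match start with
      | some s => [(s, pvIdx index (-1))]
      | none => []
  | b :: t =>
      let s := if b && start.isNone then some (pvIdx index i) else start
      if (!b) && s.isSome then (s.getD 0, pvIdx index i) :: pvSA index (i + 1) none t
      else pvSA index (i + 1) s t

-- fold → recursion bridge for port A
theorem pvA_fold (index : List Int) :
    ∀ (m : List Bool) (acc : List (Int × Int)) (start : Option Int) (i : Int),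
    (let r := (PySem.List.enumerate m i).foldl
      (fun (acc : List (Int × Int) × Option Int) (p : Int × Bool) =>
        let s := if p.2 && acc.2.isNone then some (pvIdx index p.1) else acc.2
        if (!p.2) && s.isSome then (acc.1 ++ [(s.getD 0, pvIdx index p.1)], none)
        else (acc.1, s))
      (acc, start)
     match r.2 with
     | some s => r.1 ++ [(s, pvIdx index (-1))]
     | none => r.1) = acc ++ pvSA index i start m := by
  intro m
  induction m with
  | nil =>
      intro acc start i
      cases start <;> simp [PySem.List.enumerate_nil, pvSA]
  | cons b t ih =>
      intro acc start i
      rw [PySem.List.enumerate_cons]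
      simp only [List.foldl_cons]
      cases b <;> cases start <;>
        simp only [pvSA, ih, Bool.and_self, Bool.not_true, Bool.not_false, Option.isNone_none,
          Option.isNone_some, Option.isSome_none, Option.isSome_some, Bool.true_and,
          Bool.false_and, Bool.and_true, Bool.and_false, if_true, if_false, Option.getD_some,
          List.append_assoc, List.singleton_append, List.nil_append, List.append_nil,
          ite_true, ite_false, Bool.false_eq_true, reduceIte]

-- a pending run: pvSA with start = some s emits (s, end of the current True-run) and resumes
theorem pvSA_some (index : List Int) :
    ∀ (t : List Bool) (i : Int) (s : Int),
    pvSA index i (some s) t =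
      (s, if pvRun t < t.length then pvIdx index (i + pvRun t) else pvIdx index (-1)) ::
        pvSA index (i + pvRun t + 1) none (t.drop (pvRun t + 1)) := by
  intro t
  induction t with
  | nil => intro i s; simp [pvSA, pvRun]
  | cons b t ih =>
      intro i s
      cases b with
      | false =>
          simp [pvSA, pvRun]
      | true =>
          have hrw : pvSA index i (some s) (true :: t) = pvSA index (i + 1) (some s) t := by
            simp [pvSA]
          rw [hrw, ih]
          have hrun : pvRun (true :: t) = 1 + pvRun t := rfl
          rw [hrun]
          have h1 : 1 + pvRun t < (true :: t).length ↔ pvRun t < t.length := by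
            simp [List.length_cons]; omega
          have h2 : (i + (1 + pvRun t) : Int) = i + 1 + pvRun t := by push_cast; ring
          have h3 : (true :: t).drop (1 + pvRun t + 1) = t.drop (pvRun t + 1) := by
            have : 1 + pvRun t + 1 = (pvRun t + 1) + 1 := by omega
            simp [this, List.drop_succ_cons]
          have h4 : (i + (1 + pvRun t) + 1 : Int) = i + 1 + pvRun t + 1 := by push_cast; ring
          rw [h3]
          by_cases h : pvRun t < t.length
          · simp [h, h1.mpr h, h2, h4]
            intro hh; omega
          · simp [h, fun hh => h (h1.mp hh), h4]
            intro hh; omega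

theorem pvRun_le (t : List Bool) : pvRun t ≤ t.length := by
  induction t with
  | nil => simp [pvRun]
  | cons b t ih => cases b <;> simp [pvRun] <;> omega

-- main: the state machine (start = none) equals the run scanner
theorem pvSA_eq_scan (index : List Int) :
    ∀ (len : Nat) (m : List Bool) (i : Nat), m.length = len → i + m.length = (i + m.length) →
    ∀ n : Nat, i + m.length = n →
    pvSA index (i : Int) none m = pvScan index n i m := by
  intro len
  induction len using Nat.strong_induction_on with
  | _ len ih =>
    intro m i hlen _ n hn
    cases m with
    | nil => simp [pvSA, pvScan]
    | cons b t =>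
      cases b with
      | false =>
          have ht : t.length < len := by simp at hlen; omega
          have : pvSA index ((i : Int) + 1) none t = pvScan index n (i + 1) t := by
            have := ih t.length ht t (i + 1) rfl rfl n (by simp at hn ⊢; omega)
            simpa using this
          simpa [pvSA, pvScan] using this
      | true =>
          have hstep : pvSA index (i : Int) none (true :: t) =
              pvSA index ((i : Int) + 1) (some (pvIdx index i)) t := by
            simp [pvSA]
          rw [hstep, pvSA_some]
          simp only [pvScan]
          have hk := pvRun_le t
          have hcond : pvRun t < t.length ↔ i + 1 + pvRun t < n := by
            simp at hn; omega
          have hpos : ((i : Int) + 1 + pvRun t) = ((i + 1 + pvRun t : Nat) : Int) := by push_cast; ring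
          have htail : pvSA index ((i : Int) + 1 + pvRun t + 1) none (t.drop (pvRun t + 1)) =
              pvScan index n (i + 1 + pvRun t + 1) (t.drop (pvRun t + 1)) := by
            have hlt : (t.drop (pvRun t + 1)).length < len := by
              simp [List.length_drop] at hlen ⊢; omega
            by_cases hend : pvRun t < t.length
            · have := ih _ hlt (t.drop (pvRun t + 1)) (i + 1 + pvRun t + 1) rfl rfl n
                (by simp [List.length_drop] at hn ⊢; omega)
              have hc : ((i : Int) + 1 + pvRun t + 1) = ((i + 1 + pvRun t + 1 : Nat) : Int) := by
                push_cast; ring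
              rw [hc]; exact this
            · have : t.drop (pvRun t + 1) = [] := by
                apply List.drop_eq_nil_of_le; omega
              rw [this]; simp [pvSA, pvScan]
          rw [htail, hpos]
          by_cases hend : pvRun t < t.length
          · rw [if_pos hend, if_pos (hcond.mp hend)]
          · rw [if_neg hend, if_neg (fun hh => hend (hcond.mpr hh))]

-- ===== VERDICT (by name: the statement is the Claim_ definition above) =====
theorem compute_segments_py_spec : Claim_equal_compute_segments_py := by
  intro index mask_bool _ _
  unfold Spec_compute_segments_py compute_segments_py compute_segments_py_alt
  have h1 := pvA_fold index mask_bool [] none 0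
  have h2 := pvSA_eq_scan index mask_bool.length mask_bool 0 rfl rfl mask_bool.length (by omega)
  simp only [List.nil_append] at h1
  simp only [Nat.cast_zero] at h2
  rw [← h2]
  exact h1
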